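-- pv_equiv track=rewrite | github.com/RyanSchaefer/AdventOfCode2020 | day_10/day_10_part_2.py | find_targets
-- ===== SOURCE A (Python) =====
-- def find_targets(current, search_space, seen):
--     if current in seen:
--         return seen[current]
--     elif current < 0:
--         return 0
--     elif current == 0:
--         return 1
--     elif current in search_space:
--         seen[current] = find_targets(current - 1, search_space, seen) + find_targets(current - 2, search_space, seen) + find_targets(current - 3, search_space, seen)
--         return seen[current]
--     else:
--         seen[current] = 0
--         return 0
-- ===== SOURCE B (Python) =====
-- def find_targets(current, search_space, seen):
--     # Bottom-up DP over the sorted set of "relevant" points (seen keys, 0,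
--     # search-space values, current itself) instead of memoized recursion;
--     # the recurrence value is 0 at every other point. Does not mutate `seen`.
--     pts = sorted(set(p for p in list(seen) + [0] + list(search_space) + [current] if p <= current))
--     table = {}
--     for c in pts:
--         if c in seen:
--             v = seen[c]
--         elif c < 0:
--             v = 0
--         elif c == 0:
--             v = 1
--         elif c in search_space:
--             v = table.get(c - 1, 0) + table.get(c - 2, 0) + table.get(c - 3, 0)
--         else:
--             v = 0
--         table[c] = v
--     return table[current]
-- ===== Notes on version B (the rewrite author's own statement) =====
-- stated objective: alternative
-- what changed: Replaces the top-down memoized recursion (which threads and mutates the seen dict) with a non-mutating sort-then-scan bottom-up DP: it sorts the set of relevant points (seen keys, 0, search-space values, current) and fills a fresh table in increasing order, every other point being 0 by the recurrence.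
import Mathlib
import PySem

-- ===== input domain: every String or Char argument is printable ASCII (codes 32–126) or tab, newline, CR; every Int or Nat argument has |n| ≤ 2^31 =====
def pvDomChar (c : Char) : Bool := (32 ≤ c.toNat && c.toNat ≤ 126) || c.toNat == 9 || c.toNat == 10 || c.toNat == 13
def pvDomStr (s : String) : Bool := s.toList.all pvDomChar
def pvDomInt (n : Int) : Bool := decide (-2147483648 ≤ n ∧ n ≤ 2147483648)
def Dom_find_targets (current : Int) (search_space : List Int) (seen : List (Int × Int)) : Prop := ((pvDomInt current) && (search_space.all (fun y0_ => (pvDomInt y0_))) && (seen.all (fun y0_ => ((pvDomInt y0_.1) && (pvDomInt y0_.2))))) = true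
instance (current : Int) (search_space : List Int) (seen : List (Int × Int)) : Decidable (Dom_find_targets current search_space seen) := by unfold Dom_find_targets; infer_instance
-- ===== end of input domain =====

-- B replaces A's memoized recursion by a sort-then-scan bottom-up DP over the relevant points;
-- A mutates `seen` in place while B does not — the equivalence proved here is about the RETURN value only.

-- ===== PORT A =====
-- A's recursion threads the mutated dict `seen` as explicit state: go returns (result, dict).
def findTargetsGoA (ss : List Int) (current : Int) (d : PySem.Dict Int Int) :
    Int × PySem.Dict Int Int :=
  match d.get? current with
  | some v => (v, d)                                   -- if current in seen: return seen[current]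
  | none =>
    if _h1 : current < 0 then (0, d)
    else if _h2 : current = 0 then (1, d)
    else if _h3 : current ∈ ss then
      let r1 := findTargetsGoA ss (current - 1) d
      let r2 := findTargetsGoA ss (current - 2) r1.2
      let r3 := findTargetsGoA ss (current - 3) r2.2
      let v := r1.1 + r2.1 + r3.1
      -- seen[current] = …; return seen[current]  (the value just stored is v)
      (v, r3.2.insert current v)
    else (0, d.insert current 0)                       -- seen[current] = 0; return 0
termination_by current.toNat
decreasing_by all_goals omega

def find_targets (current : Int) (search_space : List Int) (seen : List (Int × Int)) : Int :=
  (findTargetsGoA search_space current (PySem.Dict.mk seen)).1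

-- ===== PORT B =====
def find_targets_alt (current : Int) (search_space : List Int) (seen : List (Int × Int)) : Int :=
  let d : PySem.Dict Int Int := PySem.Dict.mk seen
  let pts : List Int :=
    PySem.List.sorted
      (PySem.Set.ofList ((d.keys ++ [0] ++ search_space ++ [current]).filter (fun p => p ≤ current)))
      (fun x => x) false
  let table : PySem.Dict Int Int :=
    pts.foldl (fun t c =>
      t.insert c
        (match d.get? c with
         | some v => v
         | none =>
           if c < 0 then 0
           else if c = 0 then 1
           else if c ∈ search_space then t.getD (c - 1) 0 + t.getD (c - 2) 0 + t.getD (c - 3) 0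
           else 0)) PySem.Dict.empty
  -- table[current]: current is always in pts, so the key is present; getD's default is unreachable
  table.getD current 0

-- ===== PRECONDITION & SPEC =====
def Spec_find_targets (current : Int) (search_space : List Int) (seen : List (Int × Int)) (out : Int) : Prop := out = find_targets_alt current search_space seen
instance (current : Int) (search_space : List Int) (seen : List (Int × Int)) (out : Int) : Decidable (Spec_find_targets current search_space seen out) := by unfold Spec_find_targets; infer_instance

-- ===== CLAIM (what is proved, stated in full; the proofs are below) =====
def Claim_equal_find_targets : Prop := ∀ (current : Int) (search_space : List Int) (seen : List (Int × Int)), Dom_find_targets current search_space seen → Spec_find_targets current search_space seen (find_targets current search_space seen)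

-- ===== LEMMAS AND PROOFS =====

-- The mathematical value both programs compute: the recurrence read off the ORIGINAL dict d₀.
def Gfun (ss : List Int) (d0 : PySem.Dict Int Int) (c : Int) : Int :=
  match d0.get? c with
  | some v => v
  | none =>
    if _h1 : c < 0 then 0
    else if _h2 : c = 0 then 1
    else if _h3 : c ∈ ss then Gfun ss d0 (c - 1) + Gfun ss d0 (c - 2) + Gfun ss d0 (c - 3)
    else 0
termination_by c.toNat
decreasing_by all_goals omega

-- Invariant on A's threaded dict: it extends d₀ and every stored value is the Gfun value.
def InvA (ss : List Int) (d0 d : PySem.Dict Int Int) : Prop :=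
  (∀ k : Int, (d0.get? k).isSome → (d.get? k).isSome) ∧
  (∀ (k : Int) (v : Int), d.get? k = some v → v = Gfun ss d0 k)

theorem goA_correct (ss : List Int) (d0 : PySem.Dict Int Int) (c : Int) (d : PySem.Dict Int Int)
    (h : InvA ss d0 d) :
    (findTargetsGoA ss c d).1 = Gfun ss d0 c ∧ InvA ss d0 (findTargetsGoA ss c d).2 := by
  rw [findTargetsGoA]
  cases hd : d.get? c with
  | some v =>
    refine ⟨(h.2 c v hd).symm ▸ rfl, h⟩
  | none =>
    have hd0 : d0.get? c = none := by
      cases h0 : d0.get? c with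
      | none => rfl
      | some w =>
        have hs := h.1 c (by simp [h0])
        rw [hd] at hs; simp at hs
    rw [Gfun]
    rw [hd0]
    simp only []
    split_ifs with h1 h2 h3
    · exact ⟨rfl, h⟩
    · exact ⟨rfl, h⟩
    · have ih1 := goA_correct ss d0 (c - 1) d h
      have ih2 := goA_correct ss d0 (c - 2) (findTargetsGoA ss (c - 1) d).2 ih1.2
      have ih3 := goA_correct ss d0 (c - 3)
        (findTargetsGoA ss (c - 2) (findTargetsGoA ss (c - 1) d).2).2 ih2.2
      simp only []
      rw [ih1.1, ih2.1, ih3.1]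
      refine ⟨rfl, ?_, ?_⟩
      · intro k hk
        have hk3 := ih3.2.1 k hk
        by_cases hkc : k = c
        · subst hkc; rw [PySem.Dict.get?_insert_self]; rfl
        · rw [PySem.Dict.get?_insert_of_ne _ _ hkc]; exact hk3
      · intro k v hkv
        by_cases hkc : k = c
        · subst hkc
          rw [PySem.Dict.get?_insert_self] at hkv
          rw [Gfun]; rw [hd0]
          simp only []
          rw [dif_neg h1, dif_neg h2, dif_pos h3]
          exact (Option.some.inj hkv).symm
        · rw [PySem.Dict.get?_insert_of_ne _ _ hkc] at hkv
          exact ih3.2.2 k v hkv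
    · constructor
      · rfl
      refine ⟨?_, ?_⟩
      · intro k hk
        by_cases hkc : k = c
        · subst hkc; rw [PySem.Dict.get?_insert_self]; rfl
        · rw [PySem.Dict.get?_insert_of_ne _ _ hkc]; exact h.1 k hk
      · intro k v hkv
        by_cases hkc : k = c
        · subst hkc
          rw [PySem.Dict.get?_insert_self] at hkv
          rw [Gfun]; rw [hd0]
          simp only []
          rw [dif_neg h1, dif_neg h2, dif_neg h3]
          exact (Option.some.inj hkv).symm
        · rw [PySem.Dict.get?_insert_of_ne _ _ hkc] at hkv
          exact h.2 k v hkv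
termination_by c.toNat
decreasing_by all_goals omega

-- B-side loop invariant argument
theorem foldB_correct (ss : List Int) (d0 : PySem.Dict Int Int) (current : Int)
    (l : List Int) (t : PySem.Dict Int Int)
    (hpw : l.Pairwise (· < ·)) (hle : ∀ x ∈ l, x ≤ current)
    (ht : ∀ x : Int, x ≤ current →
      t.get? x = some (Gfun ss d0 x) ∨
      (t.get? x = none ∧ (x ∈ l ∨ ((d0.get? x = none) ∧ x ≠ 0 ∧ x ∉ ss)))) :
    ∀ x : Int, x ≤ current →
      (l.foldl (fun t c =>
        t.insert c
          (match d0.get? c with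
           | some v => v
           | none =>
             if c < 0 then 0
             else if c = 0 then 1
             else if c ∈ ss then t.getD (c - 1) 0 + t.getD (c - 2) 0 + t.getD (c - 3) 0
             else 0)) t).get? x = some (Gfun ss d0 x) ∨
      ((l.foldl (fun t c =>
        t.insert c
          (match d0.get? c with
           | some v => v
           | none =>
             if c < 0 then 0
             else if c = 0 then 1
             else if c ∈ ss then t.getD (c - 1) 0 + t.getD (c - 2) 0 + t.getD (c - 3) 0
             else 0)) t).get? x = none ∧ ((d0.get? x = none) ∧ x ≠ 0 ∧ x ∉ ss)) := by
  induction l generalizing t with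
  | nil =>
    intro x hx
    rcases ht x hx with hs | ⟨hn, hrest⟩
    · exact Or.inl hs
    · rcases hrest with hmem | hbad
      · exact absurd hmem (List.not_mem_nil)
      · exact Or.inr ⟨hn, hbad⟩
  | cons c l' ih =>
    have hcle : c ≤ current := hle c (List.mem_cons_self)
    have hpw' : l'.Pairwise (· < ·) := (List.pairwise_cons.mp hpw).2
    have hcl : ∀ y ∈ l', c < y := (List.pairwise_cons.mp hpw).1
    -- the value written at c is Gfun ss d0 c
    have hval : (match d0.get? c with
         | some v => v
         | none =>
           if c < 0 then 0
           else if c = 0 then 1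
           else if c ∈ ss then t.getD (c - 1) 0 + t.getD (c - 2) 0 + t.getD (c - 3) 0
           else 0) = Gfun ss d0 c := by
      have hlook : ∀ j : Int, 1 ≤ j → j ≤ 3 → t.getD (c - j) 0 = Gfun ss d0 (c - j) := by
        intro j hj1 hj3
        have hxle : c - j ≤ current := by omega
        rcases ht (c - j) hxle with hs | ⟨hn, hrest⟩
        · rw [PySem.Dict.getD_eq_get?_getD, hs]; rfl
        · have hbad : (d0.get? (c - j) = none) ∧ (c - j) ≠ 0 ∧ (c - j) ∉ ss := by
            rcases hrest with hmem | hbad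
            · rcases List.mem_cons.mp hmem with heq | hmem'
              · omega
              · exact absurd (hcl _ hmem') (by omega)
            · exact hbad
          rw [PySem.Dict.getD_eq_get?_getD, hn]
          rw [Gfun, hbad.1]
          simp only []
          rw [dif_neg hbad.2.1, dif_neg hbad.2.2]
          split_ifs <;> rfl
      cases h0 : d0.get? c with
      | some v => rw [Gfun, h0]
      | none =>
        rw [Gfun, h0]
        simp only []
        by_cases h1 : c < 0
        · rw [if_pos h1, dif_pos h1]
        rw [if_neg h1, dif_neg h1]
        by_cases h2 : c = 0
        · rw [if_pos h2, dif_pos h2]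
        rw [if_neg h2, dif_neg h2]
        by_cases h3 : c ∈ ss
        · rw [if_pos h3, dif_pos h3]
          rw [hlook 1 (by omega) (by omega), hlook 2 (by omega) (by omega),
              hlook 3 (by omega) (by omega)]
        · rw [if_neg h3, dif_neg h3]
    rw [List.foldl_cons]
    refine ih _ hpw' (fun y hy => hle y (List.mem_cons_of_mem _ hy)) ?_
    intro x hx
    by_cases hxc : x = c
    · subst hxc
      left
      rw [PySem.Dict.get?_insert_self, hval]
    · rw [PySem.Dict.get?_insert_of_ne _ _ hxc]
      rcases ht x hx with hs | ⟨hn, hrest⟩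
      · exact Or.inl hs
      · refine Or.inr ⟨hn, ?_⟩
        rcases hrest with hmem | hbad
        · exact Or.inl ((List.mem_cons.mp hmem).resolve_left hxc)
        · exact Or.inr hbad

theorem findA_eq_Gfun (current : Int) (search_space : List Int) (seen : List (Int × Int)) :
    find_targets current search_space seen = Gfun search_space (PySem.Dict.mk seen) current := by
  have hinv : InvA search_space (PySem.Dict.mk seen) (PySem.Dict.mk seen) := by
    refine ⟨fun k hk => hk, fun k v hkv => ?_⟩
    rw [Gfun, hkv]
  exact (goA_correct search_space (PySem.Dict.mk seen) current (PySem.Dict.mk seen) hinv).1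

theorem findB_eq_Gfun (current : Int) (search_space : List Int) (seen : List (Int × Int)) :
    find_targets_alt current search_space seen = Gfun search_space (PySem.Dict.mk seen) current := by
  simp only [find_targets_alt]
  have hpw := PySem.List.sorted_ofList_pairwise_lt
    (xs := ((PySem.Dict.mk seen).keys ++ [0] ++ search_space ++ [current]).filter
      (fun p => p ≤ current))
  have hle : ∀ x ∈ PySem.List.sorted
      (PySem.Set.ofList (((PySem.Dict.mk seen).keys ++ [0] ++ search_space ++ [current]).filter
        (fun p => p ≤ current))) (fun x => x) false, x ≤ current := by
    intro x hx
    rw [PySem.List.mem_sorted] at hx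
    rw [PySem.Set.mem_ofList] at hx
    exact of_decide_eq_true (List.mem_filter.mp hx).2
  have hinit : ∀ x : Int, x ≤ current →
      (PySem.Dict.empty : PySem.Dict Int Int).get? x
          = some (Gfun search_space (PySem.Dict.mk seen) x) ∨
      ((PySem.Dict.empty : PySem.Dict Int Int).get? x = none ∧
        (x ∈ PySem.List.sorted
          (PySem.Set.ofList (((PySem.Dict.mk seen).keys ++ [0] ++ search_space ++ [current]).filter
            (fun p => p ≤ current))) (fun x => x) false ∨
         ((PySem.Dict.mk seen).get? x = none ∧ x ≠ 0 ∧ x ∉ search_space))) := by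
    intro x hx
    refine Or.inr ⟨PySem.Dict.get?_empty x, ?_⟩
    by_cases hrel : (PySem.Dict.mk seen).get? x = none ∧ x ≠ 0 ∧ x ∉ search_space
    · exact Or.inr hrel
    · left
      rw [PySem.List.mem_sorted, PySem.Set.mem_ofList, List.mem_filter]
      refine ⟨?_, decide_eq_true hx⟩
      simp only [List.mem_append, List.mem_singleton]
      by_cases hk : (PySem.Dict.mk seen).get? x = none
      · by_cases h0 : x = 0
        · exact Or.inl (Or.inl (Or.inr h0))
        · by_cases hss : x ∈ search_space
          · exact Or.inl (Or.inr hss)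
          · exact absurd ⟨hk, h0, hss⟩ hrel
      · have : x ∈ (PySem.Dict.mk seen).keys := by
          by_contra hnk
          exact hk ((PySem.Dict.get?_eq_none_iff_not_mem_keys _ _).mpr hnk)
        exact Or.inl (Or.inl (Or.inl this))
  have hmain := foldB_correct search_space (PySem.Dict.mk seen) current
    (PySem.List.sorted
      (PySem.Set.ofList (((PySem.Dict.mk seen).keys ++ [0] ++ search_space ++ [current]).filter
        (fun p => p ≤ current))) (fun x => x) false)
    PySem.Dict.empty hpw hle hinit current le_rfl
  rcases hmain with hs | ⟨hn, hbad⟩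
  · rw [PySem.Dict.getD_eq_get?_getD, hs]; rfl
  · rw [PySem.Dict.getD_eq_get?_getD, hn]
    rw [Gfun, hbad.1]
    simp only []
    rw [dif_neg hbad.2.1, dif_neg hbad.2.2]
    split_ifs <;> rfl

-- ===== VERDICT (by name: the statement is the Claim_ definition above) =====
theorem find_targets_spec : Claim_equal_find_targets := by
  intro current search_space seen _
  unfold Spec_find_targets
  rw [findA_eq_Gfun, findB_eq_Gfun]
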